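-- pv_equiv track=rewrite | github.com/jesusvilela/connection_laplacian_lean | findings/round6/stage2_fuzzer_A/sheaf_gamma/fuzz.py | count_switching_classes
-- ===== SOURCE A (Python) =====
-- def vertex_coboundary_basis(n: int, edges):
--     """For each vertex v, mask of edges incident to v (equals delta({v}))."""
--     m = len(edges)
--     out = [0] * n
--     for i, (u, v) in enumerate(edges):
--         out[u] |= (1 << i)
--         out[v] |= (1 << i)
--     return out
--
-- def all_coboundaries_set(n: int, edges):
--     """Return frozenset of all coboundary bitmasks (2^{|V|-#pi0} of them).
--
--     We compute the row-space spanned by the per-vertex coboundaries over GF(2).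
--     """
--     v_masks = vertex_coboundary_basis(n, edges)
--     # Gaussian-elim independence: pivot on each incoming mask.
--     basis = []  # list of (mask, pivot_bit)
--     for m in v_masks:
--         mm = m
--         for (b, pv) in basis:
--             if (mm >> pv) & 1:
--                 mm ^= b
--         if mm == 0:
--             continue
--         # pivot = lowest set bit
--         pv = (mm & -mm).bit_length() - 1
--         basis.append((mm, pv))
--     # Enumerate span (dimension = len(basis))
--     masks = {0}
--     for (b, _pv) in basis:
--         masks = masks | {w ^ b for w in masks}
--     return masks, len(basis)
--
-- def count_switching_classes(n: int, edges, adj):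
--     """Count switching classes: W ~ W xor delta(S). Equivalence is quotient by
--     coboundary subspace. #classes = 2^m / 2^{|V|-#pi0}."""
--     m = len(edges)
--     cob_set, cob_dim = all_coboundaries_set(n, edges)
--     # Use union-find on 2^m... but m up to 15 is 32768 which is OK.
--     # Simpler: each class is a coset of the coboundary subspace.
--     # We pick a canonical representative (min in orbit).
--     classes = set()
--     for W in range(1 << m):
--         # Canonical rep = min over {W xor c : c in cob_set}
--         rep = min(W ^ c for c in cob_set)
--         classes.add(rep)
--     return len(classes), cob_set, cob_dim
-- ===== SOURCE B (Python) =====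
-- def _reduce(basis, w):
--     """Reduce w against the basis recursively, front to back."""
--     if not basis:
--         return w
--     b, pv = basis[0]
--     return _reduce(basis[1:], w ^ b if (w >> pv) & 1 else w)
--
--
-- def _subset_xor(basis, k):
--     """XOR of the basis vectors selected by the bits of k."""
--     acc = 0
--     j = 0
--     while k:
--         if k & 1:
--             acc ^= basis[j][0]
--         k >>= 1
--         j += 1
--     return acc
--
--
-- def count_switching_classes(n, edges, adj):
--     """Count switching classes via the closed form 1 << (m - cob_dim): the
--     cosets of the coboundary subspace partition the 2^m sign vectors into
--     equal classes.  cob_set (part of the return value) is produced by the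
--     closed-form subset-XOR indexing of the basis instead of A's doubling."""
--     m = len(edges)
--     incid = [0] * n
--     for i in range(m):
--         u, v = edges[i]
--         incid[u] |= 1 << i
--         incid[v] |= 1 << i
--     basis = []
--     for w in incid:
--         r = _reduce(basis, w)
--         if r:
--             basis = basis + [(r, (r & -r).bit_length() - 1)]
--     d = len(basis)
--     cob_set = {_subset_xor(basis, k) for k in range(1 << d)}
--     return 1 << (m - d), cob_set, d
-- ===== Notes on version B (the rewrite author's own statement) =====
-- stated objective: alternative
-- what changed: B replaces A's brute-force scan of all 2^m sign vectors (min over the whole coboundary coset of each) by the closed form 1 << (m - cob_dim), builds cob_set by subset-XOR indexing of the GF(2) basis (element k = XOR of the basis vectors selected by k's bits) instead of A's iterated set-doubling, and makes the reduction step recursive; the class count no longer enumerates cosets, though returning cob_set itself still costs 2^cob_dim, so a timing run could not confirm an overall speed-up (it read 4.46x at the largest size both finished, with A timing out beyond that).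
import Mathlib
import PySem

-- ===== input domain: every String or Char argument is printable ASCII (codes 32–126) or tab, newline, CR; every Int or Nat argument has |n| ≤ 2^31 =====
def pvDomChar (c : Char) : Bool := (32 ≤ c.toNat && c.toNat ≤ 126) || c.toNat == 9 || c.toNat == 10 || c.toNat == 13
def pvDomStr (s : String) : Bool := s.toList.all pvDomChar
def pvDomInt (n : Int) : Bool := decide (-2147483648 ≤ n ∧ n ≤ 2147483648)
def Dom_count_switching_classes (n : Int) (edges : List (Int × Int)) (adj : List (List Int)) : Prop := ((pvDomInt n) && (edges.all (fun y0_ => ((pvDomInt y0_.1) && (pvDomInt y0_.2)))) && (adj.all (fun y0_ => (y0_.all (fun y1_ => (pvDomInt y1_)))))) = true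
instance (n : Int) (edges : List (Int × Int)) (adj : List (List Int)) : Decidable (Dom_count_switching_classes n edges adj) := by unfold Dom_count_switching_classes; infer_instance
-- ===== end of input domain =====

-- B replaces A's 2^m brute-force enumeration of minimal coset representatives by the
-- closed form 1 << (m - cob_dim), and builds cob_set by subset-XOR indexing of the
-- basis (element k = XOR of the basis vectors selected by k's bits) instead of doubling.
set_option maxHeartbeats 1000000


-- ===== PORT A =====

-- out[j] |= (1 << i)   (one in-place update; i comes from enumerate, so i ≥ 0 and `.toNat` is exact)
def pvTouch (out : List Int) (j : Int) (i : Nat) : List Int :=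
  PySem.List.pySetD out j (PySem.Int.bor (PySem.List.pyGetD out j 0) ((1 : Int) <<< i))

-- vertex_coboundary_basis: out = [0]*n; for i,(u,v) in enumerate(edges): out[u] |= 1<<i; out[v] |= 1<<i
def pvIncid (n : Int) (edges : List (Int × Int)) : List Int :=
  (PySem.List.enumerate edges 0).foldl
    (fun out iuv => pvTouch (pvTouch out iuv.2.1 iuv.1.toNat) iuv.2.2 iuv.1.toNat)
    (List.replicate n.toNat 0)

-- inner loop of the Gaussian elimination: for (b, pv) in basis: if (mm >> pv) & 1: mm ^= b
-- (pv is stored as a Nat: it is a `bit_length - 1`, always ≥ 0 in Python)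
def pvReduce (basis : List (Int × Nat)) (w : Int) : Int :=
  basis.foldl (fun mm bp => if PySem.Int.band (mm >>> bp.2) 1 = 1 then PySem.Int.bxor mm bp.1 else mm) w

-- the basis loop: if mm: basis.append((mm, (mm & -mm).bit_length() - 1))
def pvBasis (vmasks : List Int) : List (Int × Nat) :=
  vmasks.foldl
    (fun basis mw =>
      let mm := pvReduce basis mw
      if mm = 0 then basis
      else basis ++ [(mm, PySem.Int.bitLength (PySem.Int.band mm (-mm)) - 1)])
    []

-- masks = {0}; for (b,_pv) in basis: masks = masks | {w ^ b for w in masks}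
def pvSpan (basis : List (Int × Nat)) : PySem.Set Int :=
  basis.foldl
    (fun S bp => PySem.Set.union S (PySem.Set.ofList (S.map (fun w => PySem.Int.bxor w bp.1))))
    (PySem.Set.ofList [0])

-- port of A: brute force over range(1 << m), canonical rep = min(W ^ c for c in cob_set)
-- (m = len(edges) ≥ 0 so `m.toNat` is exact; cob_set always contains 0, so min? is never none)
def count_switching_classes (n : Int) (edges : List (Int × Int)) (adj : List (List Int)) : Int × List Int × Int :=
  let m := PySem.List.len edges
  let basis := pvBasis (pvIncid n edges)
  let cob_set := pvSpan basis
  let cob_dim : Int := basis.length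
  let classes : PySem.Set Int :=
    (PySem.List.pyRange 0 ((1 : Int) <<< m.toNat) 1).foldl
      (fun cl W =>
        match PySem.List.min? (cob_set.map (fun c => PySem.Int.bxor W c)) (fun x => x) with
        | some r => PySem.Set.add cl r
        | none => cl)
      PySem.Set.empty
  (PySem.Set.len classes, cob_set, cob_dim)

-- ===== PORT B =====
-- port of Source B: index loop over range(m) for the incidence masks, recursive _reduce,
-- recursive basis accumulation, closed-form subset-XOR span, closed-form class count.

-- out[j] |= (1 << k)
def bSet (out : List Int) (j : Int) (k : Nat) : List Int :=
  PySem.List.pySetD out j (PySem.Int.bor (PySem.List.pyGetD out j 0) ((1 : Int) <<< k))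

-- for i in range(m): u, v = edges[i]; incid[u] |= 1<<i; incid[v] |= 1<<i
-- (0 ≤ i < m, so edges[i] is always in range and pyGetD's default is never used)
def bIncid (n : Int) (edges : List (Int × Int)) : List Int :=
  (PySem.List.pyRange 0 (PySem.List.len edges) 1).foldl
    (fun out i =>
      let uv := PySem.List.pyGetD edges i ((0 : Int), (0 : Int))
      bSet (bSet out uv.1 i.toNat) uv.2 i.toNat)
    (List.replicate n.toNat 0)

-- _reduce(basis, w): recursion on the basis list
def bReduce (basis : List (Int × Nat)) (w : Int) : Int :=
  match basis with
  | [] => w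
  | bp :: rest =>
      bReduce rest (if PySem.Int.band (w >>> (bp.2 : Int)) 1 = 1 then PySem.Int.bxor w bp.1 else w)

-- the basis loop of Source B, as structural recursion on the remaining masks
def bBasis : List Int → List (Int × Nat) → List (Int × Nat)
  | [], basis => basis
  | w :: rest, basis =>
      let r := bReduce basis w
      bBasis rest
        (if r = 0 then basis
         else basis ++ [(r, PySem.Int.bitLength (PySem.Int.band r (-r)) - 1)])

-- _subset_xor: while k: if k & 1: acc ^= basis[j][0]; k >>= 1; j += 1
-- (ported with the consumed prefix dropped instead of the index j; in every call
--  k < 2^len(basis), so Python's basis[j] never goes out of range and the headD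
--  default is never used)
def bSubXor (basis : List (Int × Nat)) (k : Nat) (acc : Int) : Int :=
  if k = 0 then acc
  else bSubXor basis.tail (k / 2)
        (if k % 2 = 1 then PySem.Int.bxor acc (basis.headD ((0 : Int), 0)).1 else acc)
  termination_by k
  decreasing_by omega

-- cob_set = {_subset_xor(basis, k) for k in range(1 << d)}
def bSpan (basis : List (Int × Nat)) : PySem.Set Int :=
  PySem.Set.ofList
    ((PySem.List.pyRange 0 ((1 : Int) <<< basis.length) 1).map (fun k => bSubXor basis k.toNat 0))

-- port of B: closed-form count 1 << (m - d)  (d ≤ m always, so `.toNat` is exact)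
def count_switching_classes_alt (n : Int) (edges : List (Int × Int)) (adj : List (List Int)) : Int × List Int × Int :=
  let m := PySem.List.len edges
  let basis := bBasis (bIncid n edges) []
  let d : Int := basis.length
  let cob_set := bSpan basis
  ((1 : Int) <<< (m - d).toNat, cob_set, d)

-- ===== PRECONDITION & SPEC =====
-- Pre_ excludes exactly the inputs where Python A raises IndexError: an edge endpoint
-- that is not a valid (possibly negative) index into the length-n vertex list.
def Pre_count_switching_classes (n : Int) (edges : List (Int × Int)) (adj : List (List Int)) : Prop :=
  ∀ p ∈ edges, (-n ≤ p.1 ∧ p.1 < n) ∧ (-n ≤ p.2 ∧ p.2 < n)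
instance (n : Int) (edges : List (Int × Int)) (adj : List (List Int)) : Decidable (Pre_count_switching_classes n edges adj) := by unfold Pre_count_switching_classes; infer_instance

def pvWitness_count_switching_classes : Int × (List (Int × Int)) × List (List Int) := (3, [(0, 1), (1, 2)], [])

def Spec_count_switching_classes (n : Int) (edges : List (Int × Int)) (adj : List (List Int)) (out : Int × List Int × Int) : Prop := out = count_switching_classes_alt n edges adj
instance (n : Int) (edges : List (Int × Int)) (adj : List (List Int)) (out : Int × List Int × Int) : Decidable (Spec_count_switching_classes n edges adj out) := by unfold Spec_count_switching_classes; infer_instance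

-- ===== CLAIM (what is proved, stated in full; the proofs are below) =====
def Claim_equal_count_switching_classes : Prop := ∀ (n : Int) (edges : List (Int × Int)) (adj : List (List Int)), Dom_count_switching_classes n edges adj → Pre_count_switching_classes n edges adj → Spec_count_switching_classes n edges adj (count_switching_classes n edges adj)

-- ===== LEMMAS AND PROOFS =====

-- ---------- bridging B's helpers to A's ----------
theorem pvBIncidEq (n : Int) (edges : List (Int × Int)) : bIncid n edges = pvIncid n edges := by
  unfold bIncid pvIncid
  rw [PySem.List.enumerate_eq_map_pyRange (d := ((0 : Int), (0 : Int))), List.foldl_map]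
  rfl

theorem pvBReduceEq (B : List (Int × Nat)) (w : Int) : bReduce B w = pvReduce B w := by
  induction B generalizing w with
  | nil => rfl
  | cons p B ih => simp [bReduce, pvReduce, List.foldl] at ih ⊢; rw [ih]

theorem pvBBasisEq (V : List Int) : ∀ B0 : List (Int × Nat),
    bBasis V B0 = V.foldl
      (fun basis mw =>
        let mm := pvReduce basis mw
        if mm = 0 then basis
        else basis ++ [(mm, PySem.Int.bitLength (PySem.Int.band mm (-mm)) - 1)])
      B0 := by
  induction V with
  | nil => intro B0; rfl
  | cons w V ih =>
    intro B0
    show bBasis V _ = _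
    rw [ih]
    simp only [List.foldl, pvBReduceEq]

theorem pvBBasisPv (V : List Int) : bBasis V [] = pvBasis V := pvBBasisEq V []

-- ---------- bit-level facts ----------
theorem pvOneShl (k : Nat) : (1:Int) <<< k = ((2^k : Nat) : Int) := by
  simp [Int.shiftLeft_eq]

theorem pvAndPredOdd (m : Nat) : (2*m+1) &&& (2*m) = 2*m := by
  apply Nat.eq_of_testBit_eq
  intro i
  rw [Nat.testBit_and]
  cases i with
  | zero => simp
  | succ j =>
    rw [Nat.testBit_succ, Nat.testBit_succ]
    have h1 : (2*m+1)/2 = m := by omega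
    have h2 : (2*m)/2 = m := by omega
    rw [h1, h2, Bool.and_self]

theorem pvAndPredEven (m : Nat) (h : 0 < m) : (2*m) &&& (2*m-1) = 2*(m &&& (m-1)) := by
  apply Nat.eq_of_testBit_eq
  intro i
  rw [Nat.testBit_and]
  cases i with
  | zero =>
    have h1 : 2*m-1 = 2*(m-1)+1 := by omega
    simp [h1]
  | succ j =>
    rw [Nat.testBit_succ, Nat.testBit_succ]
    have h1 : (2*m)/2 = m := by omega
    have h2 : (2*m-1)/2 = m-1 := by omega
    rw [h1, h2, ← Nat.testBit_and, Nat.testBit_succ]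
    have h3 : (2*(m &&& (m-1)))/2 = m &&& (m-1) := by omega
    rw [h3]

theorem pvSubAndPred (x : Nat) (hx : 0 < x) :
    ∃ k, x - (x &&& (x-1)) = 2^k ∧ x.testBit k = true ∧ ∀ j < k, x.testBit j = false := by
  induction x using Nat.strong_induction_on with
  | _ x ih =>
    rcases Nat.even_or_odd x with ⟨m, hm⟩ | ⟨m, hm⟩
    · have hm0 : 0 < m := by omega
      have hx2 : x = 2*m := by omega
      obtain ⟨k, hk, hb, hlow⟩ := ih m (by omega) hm0
      refine ⟨k+1, ?_, ?_, ?_⟩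
      · rw [hx2, pvAndPredEven m hm0]
        have : 2*m - 2*(m &&& (m-1)) = 2*(m - (m &&& (m-1))) := by
          have := Nat.and_le_left (n := m) (m := m-1)
          omega
        rw [this, hk, pow_succ]; ring
      · rw [hx2, Nat.mul_comm, Nat.testBit_succ]
        have h2 : m*2/2 = m := by omega
        rw [h2]; exact hb
      · intro j hj
        cases j with
        | zero => simp [hx2, Nat.mul_comm]
        | succ i =>
          rw [hx2, Nat.mul_comm, Nat.testBit_succ]
          have h2 : m*2/2 = m := by omega
          rw [h2]
          exact hlow i (by omega)
    · refine ⟨0, ?_, ?_, by omega⟩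
      · rw [hm]
        have : 2*m+1-1 = 2*m := by omega
        rw [this, pvAndPredOdd]; omega
      · simp [hm]

theorem pvBandNegSelf (x : Nat) (hx : 0 < x) :
    PySem.Int.band (x : Int) (-(x : Int)) = ((x - (x &&& (x-1)) : Nat) : Int) := by
  unfold PySem.Int.band
  have h1 : (0:Int) ≤ (x:Int) := by positivity
  have h2 : ¬ (0:Int) ≤ -(x:Int) := by omega
  simp only [h1, h2, if_false, if_pos]
  congr 1
  have : (-(-(x:Int)) - 1).toNat = x - 1 := by omega
  rw [this]
  simp

theorem pvBitLengthTwoPow (k : Nat) : PySem.Int.bitLength ((2^k : Nat) : Int) = k + 1 := by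
  have hne : ((2^k : Nat) : Int) ≠ 0 := by positivity
  have h1 := PySem.Int.lt_two_pow_bitLength ((2^k : Nat) : Int)
  have h2 := PySem.Int.two_pow_bitLength_le ((2^k : Nat) : Int) hne
  rw [Int.natAbs_natCast] at h1 h2
  set bl := PySem.Int.bitLength ((2^k : Nat) : Int) with hbl
  have hk1 : k < bl := by
    by_contra hc
    exact absurd h1 (by push_neg; exact Nat.pow_le_pow_right (by norm_num) (by omega))
  have hk2 : bl - 1 ≤ k := by
    by_contra hc
    exact absurd h2 (by push_neg; exact Nat.pow_lt_pow_right (by norm_num) (by omega))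
  omega

-- the pivot computed by the port is the lowest set bit of the reduced mask
theorem pvPivotSpec (x : Nat) (hx : 0 < x) :
    (x.testBit (PySem.Int.bitLength (PySem.Int.band (x : Int) (-(x : Int))) - 1) = true) ∧
    ∀ j < PySem.Int.bitLength (PySem.Int.band (x : Int) (-(x : Int))) - 1, x.testBit j = false := by
  obtain ⟨k, hk, hb, hlow⟩ := pvSubAndPred x hx
  rw [pvBandNegSelf x hx, hk, pvBitLengthTwoPow]
  simpa using ⟨hb, hlow⟩

-- the reduction test '(mm >> pv) & 1 == 1' is testBit
theorem pvBandTest (a pv : Nat) :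
    (PySem.Int.band ((a : Int) >>> ((pv:Nat):Int)) 1 = 1) ↔ a.testBit pv = true := by
  have h1 : ((a:Int) >>> ((pv:Nat):Int)) = ((a >>> pv : Nat) : Int) := Int.shiftRight_natCast a pv
  have h2 : (1:Int) = ((1:Nat):Int) := rfl
  rw [h1, h2, PySem.Int.band_natCast, Nat.and_one_is_mod, Nat.shiftRight_eq_div_pow]
  rw [Nat.testBit, Nat.shiftRight_eq_div_pow, Nat.one_and_eq_mod_two]
  constructor
  · intro h
    have : a / 2 ^ pv % 2 = 1 := by exact_mod_cast h
    simp [this]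
  · intro h
    simp at h
    have : a / 2 ^ pv % 2 = 1 := by omega
    exact_mod_cast this

-- ---------- a generic foldl invariant ----------
theorem pvFoldPreserve {α β : Type} (P : β → Prop) (E : List α) (f : β → α → β) (L0 : β)
    (h0 : P L0) (hf : ∀ L, P L → ∀ p ∈ E, P (f L p)) : P (E.foldl f L0) := by
  induction E generalizing L0 with
  | nil => exact h0
  | cons e E ih =>
    exact ih (f L0 e) (hf L0 h0 e (by simp)) (fun L hL p hp => hf L hL p (by simp [hp]))

-- ---------- incidence masks are < 2^m ----------
theorem pvMemPySetD {l : List Int} {i : Int} {v x : Int}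
    (hx : x ∈ PySem.List.pySetD l i v) : x = v ∨ x ∈ l := by
  unfold PySem.List.pySetD PySem.List.pySet? at hx
  cases h : PySem.List.pyIdx? l.length i with
  | none => rw [h] at hx; right; simpa using hx
  | some k =>
    rw [h] at hx
    simp at hx
    rcases List.mem_or_eq_of_mem_set hx with h' | h'
    · right; exact h'
    · left; exact h'

theorem pvPyGetDZero (l : List Int) (i : Int) :
    PySem.List.pyGetD l i 0 = 0 ∨ PySem.List.pyGetD l i 0 ∈ l := by
  unfold PySem.List.pyGetD
  cases h : PySem.List.pyGet? l i with
  | none => left; rfl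
  | some y => right; simpa using PySem.List.mem_of_pyGet?_eq_some l h

def pvBdd (m : Nat) (L : List Int) : Prop := ∀ x ∈ L, ∃ a : Nat, x = (a:Int) ∧ a < 2^m

theorem pvBorStep (m k : Nat) (hk : k < m) (L : List Int) (hL : pvBdd m L) (j : Int) :
    ∃ a : Nat, PySem.Int.bor (PySem.List.pyGetD L j 0) ((1:Int) <<< k) = (a:Int) ∧ a < 2^m := by
  have hg : ∃ a : Nat, PySem.List.pyGetD L j 0 = (a:Int) ∧ a < 2^m := by
    rcases pvPyGetDZero L j with h | h
    · exact ⟨0, h, Nat.two_pow_pos _⟩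
    · exact hL _ h
  obtain ⟨a, ha, hab⟩ := hg
  refine ⟨a ||| 2^k, ?_, Nat.or_lt_two_pow hab (Nat.pow_lt_pow_right (by norm_num) hk)⟩
  rw [ha, pvOneShl, PySem.Int.bor_natCast]

theorem pvSetDBdd (m : Nat) {L : List Int} (hL : pvBdd m L) {v : Int} {j : Int}
    (hv : ∃ a : Nat, v = (a:Int) ∧ a < 2^m) : pvBdd m (PySem.List.pySetD L j v) := by
  intro x hx
  rcases pvMemPySetD hx with h | h
  · exact h ▸ hv
  · exact hL _ h

theorem pvTouchBdd {m k : Nat} (hk : k < m) {L : List Int} (hL : pvBdd m L) {j : Int} :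
    pvBdd m (pvTouch L j k) :=
  pvSetDBdd m hL (pvBorStep m k hk L hL j)

theorem pvIncidBdd (n : Int) (edges : List (Int × Int)) :
    pvBdd edges.length (pvIncid n edges) := by
  unfold pvIncid
  apply pvFoldPreserve
  · intro x hx
    rw [List.eq_of_mem_replicate hx]
    exact ⟨0, rfl, Nat.two_pow_pos _⟩
  · intro L hL iuv hiuv
    obtain ⟨k, hk, hp⟩ := (PySem.List.mem_enumerate_iff _ _ _).mp hiuv
    have hfst : iuv.1.toNat = k := by rw [hp]; simp
    rw [hfst]
    exact pvTouchBdd hk (pvTouchBdd hk hL)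

-- ---------- Gaussian elimination invariant ----------
def pvGoodB (m : Nat) (B : List (Int × Nat)) : Prop :=
  (∀ p ∈ B, ∃ b : Nat, p.1 = (b:Int) ∧ b < 2^m ∧ 0 < b ∧ b.testBit p.2 = true ∧
      ∀ j < p.2, b.testBit j = false)
  ∧ B.Pairwise (fun p q => q.1.natAbs.testBit p.2 = false)

theorem pvReduceSpec (m : Nat) (B : List (Int × Nat)) (hB : pvGoodB m B)
    (x : Nat) (hx : x < 2^m) :
    ∃ r : Nat, pvReduce B (x:Int) = (r:Int) ∧ r < 2^m ∧
      (∀ p ∈ B, r.testBit p.2 = false) ∧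
      (∀ k, (∀ p ∈ B, p.1.natAbs.testBit k = false) → r.testBit k = x.testBit k) := by
  induction B generalizing x with
  | nil => exact ⟨x, rfl, hx, by simp, fun k _ => rfl⟩
  | cons p B ih =>
    obtain ⟨hel, hpw⟩ := hB
    obtain ⟨b, hb1, hblt, hbpos, hbbit, hblow⟩ := hel p (by simp)
    have hpwB : B.Pairwise (fun p q => q.1.natAbs.testBit p.2 = false) := hpw.of_cons
    have hBgood : pvGoodB m B := ⟨fun q hq => hel q (by simp [hq]), hpwB⟩
    have hcross : ∀ q ∈ B, q.1.natAbs.testBit p.2 = false :=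
      fun q hq => (List.pairwise_cons.mp hpw).1 q hq
    set x1 : Nat := if x.testBit p.2 then x ^^^ b else x with hx1
    have hstep : pvReduce (p :: B) (x:Int) = pvReduce B (x1:Int) := by
      have harg : (if PySem.Int.band ((x:Int) >>> ((p.2:Nat):Int)) 1 = 1 then PySem.Int.bxor (x:Int) p.1
          else (x:Int)) = (x1:Int) := by
        rw [hb1]
        by_cases h : x.testBit p.2 = true
        · rw [if_pos ((pvBandTest x p.2).mpr h), PySem.Int.bxor_natCast, hx1, if_pos h]
        · rw [if_neg (fun hc => h ((pvBandTest x p.2).mp hc)), hx1, if_neg h]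
      show pvReduce B
        (if PySem.Int.band ((x:Int) >>> ((p.2:Nat):Int)) 1 = 1 then PySem.Int.bxor (x:Int) p.1
          else (x:Int)) = pvReduce B (x1:Int)
      rw [harg]
    have hx1lt : x1 < 2^m := by
      rw [hx1]; split
      · exact Nat.xor_lt_two_pow hx hblt
      · exact hx
    have hx1p : x1.testBit p.2 = false := by
      rw [hx1]; split
      · rw [Nat.testBit_xor]
        simp_all
      · simp_all
    obtain ⟨r, hr, hrlt, hrclr, hrpres⟩ := ih hBgood x1 hx1lt
    refine ⟨r, by rw [hstep, hr], hrlt, ?_, ?_⟩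
    · intro q hq
      rcases List.mem_cons.mp hq with h | h
      · rw [h] at *
        rw [hrpres p.2 hcross]
        exact hx1p
      · exact hrclr q h
    · intro k hk
      have hbk : b.testBit k = false := by
        have := hk p (by simp)
        rwa [hb1, Int.natAbs_natCast] at this
      rw [hrpres k (fun q hq => hk q (by simp [hq]))]
      rw [hx1]; split
      · rw [Nat.testBit_xor, hbk]; simp
      · rfl

theorem pvBasisGood (m : Nat) (V : List Int) (hV : pvBdd m V) : pvGoodB m (pvBasis V) := by
  unfold pvBasis
  apply pvFoldPreserve
  · exact ⟨by simp, List.Pairwise.nil⟩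
  · intro B hB v hv
    obtain ⟨x, hx1, hxlt⟩ := hV v hv
    obtain ⟨r, hr, hrlt, hrclr, _⟩ := pvReduceSpec m B hB x hxlt
    rw [hx1, hr]
    by_cases h0 : r = 0
    · simp [h0]
      exact hB
    · have hrpos : 0 < r := Nat.pos_of_ne_zero h0
      have hne : ((r:Nat):Int) ≠ 0 := by exact_mod_cast h0
      rw [if_neg hne]
      obtain ⟨hbit, hlow⟩ := pvPivotSpec r hrpos
      obtain ⟨hel, hpw⟩ := hB
      constructor
      · intro p hp
        rcases List.mem_append.mp hp with h | h
        · exact hel p h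
        · have hp' : p = ((r:Int), PySem.Int.bitLength (PySem.Int.band (r:Int) (-(r:Int))) - 1) := by
            simpa using h
          subst hp'
          exact ⟨r, rfl, hrlt, hrpos, hbit, hlow⟩
      · rw [List.pairwise_append]
        refine ⟨hpw, List.pairwise_singleton _ _, ?_⟩
        intro p hp q hq
        have hq' : q = ((r:Int), PySem.Int.bitLength (PySem.Int.band (r:Int) (-(r:Int))) - 1) := by
          simpa using hq
        subst hq'
        simpa using hrclr p hp

-- ---------- subset-XOR indexing ----------
theorem pvSubXorZero (B : List (Int × Nat)) (acc : Int) : bSubXor B 0 acc = acc := by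
  conv_lhs => rw [bSubXor]
  simp

theorem pvSubXorStep (B : List (Int × Nat)) (k : Nat) (acc : Int) (h : k ≠ 0) :
    bSubXor B k acc
      = bSubXor B.tail (k / 2)
          (if k % 2 = 1 then PySem.Int.bxor acc (B.headD ((0 : Int), 0)).1 else acc) := by
  conv_lhs => rw [bSubXor]
  rw [if_neg h]

theorem pvSubXorLo (B : List (Int × Nat)) (p : Int × Nat) :
    ∀ k, k < 2^B.length → ∀ acc, bSubXor (B ++ [p]) k acc = bSubXor B k acc := by
  induction B with
  | nil =>
    intro k hk acc
    have : k = 0 := by simpa using hk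
    subst this
    rw [pvSubXorZero, pvSubXorZero]
  | cons q B ih =>
    intro k hk acc
    by_cases h0 : k = 0
    · subst h0; rw [pvSubXorZero, pvSubXorZero]
    · rw [pvSubXorStep _ _ _ h0, pvSubXorStep (q :: B) _ _ h0]
      simp only [List.cons_append, List.tail_cons, List.headD_cons]
      have hq : k / 2 < 2^B.length := by
        have he : 2^(q :: B : List (Int × Nat)).length = 2 * 2^B.length := by
          simp [pow_succ]; ring
        omega
      exact ih (k/2) hq _

theorem pvSubXorHi (B : List (Int × Nat)) (p : Int × Nat) :
    ∀ k, k < 2^B.length → ∀ acc,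
      bSubXor (B ++ [p]) (2^B.length + k) acc = PySem.Int.bxor (bSubXor B k acc) p.1 := by
  induction B with
  | nil =>
    intro k hk acc
    have : k = 0 := by simpa using hk
    subst this
    have h1 : 2^([] : List (Int × Nat)).length + 0 = 1 := by simp
    rw [h1, pvSubXorStep _ _ _ one_ne_zero]
    norm_num [pvSubXorZero]
  | cons q B ih =>
    intro k hk acc
    have he2 : 2^(q :: B : List (Int × Nat)).length = 2 * 2^B.length := by
      simp [pow_succ]; ring
    have hne : 2^(q :: B : List (Int × Nat)).length + k ≠ 0 := by positivity
    have hkne : (2^(q :: B : List (Int × Nat)).length + k) % 2 = k % 2 := by omega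
    have hkd : (2^(q :: B : List (Int × Nat)).length + k) / 2 = 2^B.length + k / 2 := by omega
    rw [pvSubXorStep _ _ _ hne, hkne, hkd]
    simp only [List.cons_append, List.tail_cons, List.headD_cons]
    by_cases h0 : k = 0
    · subst h0
      simp only [Nat.zero_div]
      rw [ih 0 (Nat.two_pow_pos _) _]
      norm_num [pvSubXorZero]
    · conv_rhs => rw [pvSubXorStep (q :: B) k acc h0]
      simp only [List.tail_cons, List.headD_cons]
      have hq : k / 2 < 2^B.length := by omega
      exact ih (k/2) hq _

-- ---------- span invariant ----------
theorem pvGoodBSub (m : Nat) (B : List (Int × Nat)) (p : Int × Nat)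
    (h : pvGoodB m (B ++ [p])) : pvGoodB m B :=
  ⟨fun q hq => h.1 q (by simp [hq]), (List.pairwise_append.mp h.2).1⟩

theorem pvSpanSpec (m : Nat) (B : List (Int × Nat)) (hB : pvGoodB m B) :
    ∃ A : List Nat, pvSpan B = A.map (Nat.cast : Nat → Int) ∧ A.Nodup ∧ 0 ∈ A ∧
      (∀ a ∈ A, a < 2^m) ∧ (∀ a ∈ A, ∀ b ∈ A, a ^^^ b ∈ A) ∧
      A.length = 2^B.length ∧
      ((List.range (2^B.length)).map (fun k => bSubXor B k 0) = A.map (Nat.cast : Nat → Int)) ∧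
      (∀ a ∈ A, a ≠ 0 → ∃ p ∈ B, a.testBit p.2 = true) := by
  induction B using List.reverseRecOn with
  | nil =>
    refine ⟨[0], rfl, by simp, by simp, by simp, by simp, by simp, ?_, by simp⟩
    simp [List.range_one, pvSubXorZero]
  | append_singleton B p ih =>
    obtain ⟨A, hA, hnd, h0, hbd, hcl, hlen, hsx, hpiv⟩ := ih (pvGoodBSub m B p hB)
    obtain ⟨b, hb1, hblt, hbpos, hbbit, hblow⟩ := hB.1 p (by simp)
    have hcross : ∀ q ∈ B, p.1.natAbs.testBit q.2 = false := by
      intro q hq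
      exact (List.pairwise_append.mp hB.2).2.2 q hq p (by simp)
    have hbA : b ∉ A := by
      intro hmem
      have hbne : b ≠ 0 := by omega
      obtain ⟨q, hq, hbit⟩ := hpiv b hmem hbne
      have := hcross q hq
      rw [hb1, Int.natAbs_natCast] at this
      rw [this] at hbit
      exact Bool.false_ne_true hbit
    have hstep : pvSpan (B ++ [p]) =
        PySem.Set.union (pvSpan B) (PySem.Set.ofList ((pvSpan B).map (fun w => PySem.Int.bxor w p.1))) := by
      unfold pvSpan
      rw [List.foldl_append]
      rfl
    set N : List Nat := A.map (fun a => a ^^^ b) with hN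
    have hmapcast : (pvSpan B).map (fun w => PySem.Int.bxor w p.1) = N.map (Nat.cast : Nat → Int) := by
      rw [hA, hb1, hN, List.map_map, List.map_map]
      apply List.map_congr_left
      intro a _
      simp [PySem.Int.bxor_natCast]
    have hNnd : N.Nodup := hnd.map (fun a a' h => by
      have : a ^^^ b ^^^ b = a' ^^^ b ^^^ b := by rw [h]
      simpa [Nat.xor_assoc] using this)
    have hNcast_nd : (N.map (Nat.cast : Nat → Int)).Nodup :=
      hNnd.map (fun a a' h => by exact_mod_cast h)
    have hNdisj : ∀ y ∈ N.map (Nat.cast : Nat → Int), y ∉ pvSpan B := by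
      intro y hy hyS
      obtain ⟨a', ha', rfl⟩ := List.mem_map.mp hy
      obtain ⟨a0, ha0, rfl⟩ := List.mem_map.mp ha'
      rw [hA] at hyS
      obtain ⟨a'', ha'', hy''⟩ := List.mem_map.mp hyS
      have he : a0 ^^^ b = a'' := by exact_mod_cast hy''.symm
      have hbin : b ∈ A := by
        have h1 : b = a0 ^^^ a'' := by
          rw [← he, ← Nat.xor_assoc, Nat.xor_self, Nat.zero_xor]
        rw [h1]; exact hcl a0 ha0 a'' ha''
      exact hbA hbin
    have hunion : pvSpan (B ++ [p]) = (A ++ N).map (Nat.cast : Nat → Int) := by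
      rw [hstep, hmapcast, PySem.Set.ofList_eq_self_of_nodup _ hNcast_nd]
      show PySem.Set.update _ _ = _
      rw [PySem.Set.update_eq_append_of_disjoint _ _ hNcast_nd (fun y hy => hNdisj y hy)]
      rw [hA, List.map_append]
    have hsx' : (List.range (2^(B ++ [p]).length)).map (fun k => bSubXor (B ++ [p]) k 0)
        = (A ++ N).map (Nat.cast : Nat → Int) := by
      have hlen1 : (B ++ [p]).length = B.length + 1 := by simp
      have hsplit : List.range (2^(B.length + 1)) =
          List.range (2^B.length) ++ (List.range (2^B.length)).map (2^B.length + ·) := by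
        have : 2^(B.length + 1) = 2^B.length + 2^B.length := by rw [pow_succ]; ring
        rw [this, List.range_add]
      have hmapAN : List.map (Nat.cast : Nat → Int) (A ++ N)
          = A.map (Nat.cast : Nat → Int) ++ N.map (Nat.cast : Nat → Int) := by
        simp
      rw [hlen1, hsplit, List.map_append, List.map_map, hmapAN]
      congr 1
      · rw [← hsx]
        apply List.map_congr_left
        intro k hk
        exact pvSubXorLo B p k (List.mem_range.mp hk) 0
      · have : ((List.range (2^B.length)).map ((fun k => bSubXor (B ++ [p]) k 0) ∘ (2^B.length + ·)))
            = (List.range (2^B.length)).map (fun k => PySem.Int.bxor (bSubXor B k 0) p.1) := by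
          apply List.map_congr_left
          intro k hk
          exact pvSubXorHi B p k (List.mem_range.mp hk) 0
        rw [this, ← hmapcast, hA, ← hsx, List.map_map]
        rfl
    refine ⟨A ++ N, hunion, ?_, by simp [h0], ?_, ?_, ?_, hsx', ?_⟩
    · rw [List.nodup_append]
      refine ⟨hnd, hNnd, ?_⟩
      intro a ha a'' ha'' heq
      subst heq
      exact hNdisj (a:Int) (List.mem_map.mpr ⟨a, ⟨ha'', rfl⟩⟩) (by rw [hA]; exact List.mem_map.mpr ⟨a, ⟨ha, rfl⟩⟩)
    · intro a ha
      rcases List.mem_append.mp ha with h | h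
      · exact hbd a h
      · obtain ⟨a', ha', rfl⟩ := List.mem_map.mp h
        exact Nat.xor_lt_two_pow (hbd a' ha') hblt
    · intro a ha c hc
      rcases List.mem_append.mp ha with h1 | h1 <;> rcases List.mem_append.mp hc with h2 | h2
      · exact List.mem_append_left _ (hcl a h1 c h2)
      · obtain ⟨c', hc', rfl⟩ := List.mem_map.mp h2
        refine List.mem_append_right _ ?_
        rw [hN]
        have : a ^^^ (c' ^^^ b) = (a ^^^ c') ^^^ b := by rw [Nat.xor_assoc]
        rw [this]
        exact List.mem_map.mpr ⟨_, hcl a h1 c' hc', rfl⟩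
      · obtain ⟨a', ha', rfl⟩ := List.mem_map.mp h1
        refine List.mem_append_right _ ?_
        rw [hN]
        have : (a' ^^^ b) ^^^ c = (a' ^^^ c) ^^^ b := by
          rw [Nat.xor_assoc, Nat.xor_assoc, Nat.xor_comm b c]
        rw [this]
        exact List.mem_map.mpr ⟨_, hcl a' ha' c h2, rfl⟩
      · obtain ⟨a', ha', rfl⟩ := List.mem_map.mp h1
        obtain ⟨c', hc', rfl⟩ := List.mem_map.mp h2
        refine List.mem_append_left _ ?_
        have : (a' ^^^ b) ^^^ (c' ^^^ b) = a' ^^^ c' := by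
          rw [Nat.xor_comm c' b, ← Nat.xor_assoc, Nat.xor_assoc a' b b]
          simp [Nat.xor_assoc]
        rw [this]
        exact hcl a' ha' c' hc'
    · simp [hN, hlen]
      ring
    · intro a ha hane
      rcases List.mem_append.mp ha with h | h
      · obtain ⟨q, hq, hbit⟩ := hpiv a h hane
        exact ⟨q, by simp [hq], hbit⟩
      · obtain ⟨a', ha', rfl⟩ := List.mem_map.mp h
        by_cases hcase : a'.testBit p.2 = true
        · have ha'ne : a' ≠ 0 := by
            intro hz; rw [hz] at hcase; simp at hcase
          obtain ⟨q, hq, hbit⟩ := hpiv a' ha' ha'ne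
          have hbq : b.testBit q.2 = false := by
            have := hcross q hq
            rwa [hb1, Int.natAbs_natCast] at this
          refine ⟨q, by simp [hq], ?_⟩
          rw [Nat.testBit_xor, hbit, hbq]
          rfl
        · refine ⟨p, by simp, ?_⟩
          rw [Nat.testBit_xor, hbbit]
          simp at hcase
          rw [hcase]
          rfl

-- ---------- coset counting ----------
def pvRep (A : List Nat) (w : Nat) : Nat := ((A.map (fun a => w ^^^ a)).min?).getD 0

theorem pvRepSpec (A : List Nat) (hA : A ≠ []) (w : Nat) :
    (pvRep A w) ∈ A.map (fun a => w ^^^ a) ∧ ∀ z ∈ A.map (fun a => w ^^^ a), pvRep A w ≤ z := by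
  have hne : A.map (fun a => w ^^^ a) ≠ [] := by simpa using hA
  cases h : (A.map (fun a => w ^^^ a)).min? with
  | none => exact absurd (List.min?_eq_none_iff.mp h) hne
  | some v =>
    have := List.min?_eq_some_iff.mp h
    unfold pvRep
    rw [h]
    exact this

-- the port's min over {W ^ c for c in cob_set} is pvRep
theorem pvPortMin (A : List Nat) (hA : A ≠ []) (w : Nat) :
    PySem.List.min? ((A.map (Nat.cast : Nat → Int)).map (fun c => PySem.Int.bxor ((w:Nat):Int) c)) (fun x => x)
      = some ((pvRep A w : Nat) : Int) := by
  have hlist : (A.map (Nat.cast : Nat → Int)).map (fun c => PySem.Int.bxor ((w:Nat):Int) c)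
      = (A.map (fun a => w ^^^ a)).map (Nat.cast : Nat → Int) := by
    rw [List.map_map, List.map_map]
    apply List.map_congr_left
    intro a _
    simp [PySem.Int.bxor_natCast]
  rw [hlist]
  set l := A.map (fun a => w ^^^ a) with hl
  have hne : l.map (Nat.cast : Nat → Int) ≠ [] := by simp [hl, hA]
  cases h : PySem.List.min? (l.map (Nat.cast : Nat → Int)) (fun x => x) with
  | none => exact absurd ((PySem.List.min?_eq_none_iff _ _).mp h) hne
  | some y =>
    obtain ⟨y', hy', rfl⟩ := List.mem_map.mp (PySem.List.min?_mem h)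
    have hymin := PySem.List.min?_isMin h
    obtain ⟨hmem, hmin⟩ := pvRepSpec A hA w
    congr 1
    have h1 : pvRep A w ≤ y' := hmin y' hy'
    have h2 : y' ≤ pvRep A w := by
      have := hymin ((pvRep A w : Nat) : Int) (List.mem_map.mpr ⟨_, hmem, rfl⟩)
      exact_mod_cast this
    omega

-- rep is constant on cosets and idempotent
theorem pvRepCoset (A : List Nat) (hA : A ≠ []) (hcl : ∀ a ∈ A, ∀ b ∈ A, a ^^^ b ∈ A)
    (w : Nat) (s : Nat) (hs : s ∈ A) : pvRep A (w ^^^ s) = pvRep A w := by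
  have hmemiff : ∀ z, z ∈ A.map (fun a => (w ^^^ s) ^^^ a) ↔ z ∈ A.map (fun a => w ^^^ a) := by
    intro z
    constructor
    · intro hz
      obtain ⟨a, ha, rfl⟩ := List.mem_map.mp hz
      exact List.mem_map.mpr ⟨s ^^^ a, hcl s hs a ha, by rw [← Nat.xor_assoc]⟩
    · intro hz
      obtain ⟨a, ha, rfl⟩ := List.mem_map.mp hz
      exact List.mem_map.mpr ⟨s ^^^ a, hcl s hs a ha, by rw [← Nat.xor_assoc, Nat.xor_assoc w s s]; simp⟩
  obtain ⟨hm1, hmin1⟩ := pvRepSpec A hA (w ^^^ s)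
  obtain ⟨hm2, hmin2⟩ := pvRepSpec A hA w
  have h1 : pvRep A (w ^^^ s) ≤ pvRep A w := hmin1 _ ((hmemiff _).mpr hm2)
  have h2 : pvRep A w ≤ pvRep A (w ^^^ s) := hmin2 _ ((hmemiff _).mp hm1)
  omega

theorem pvRepFixed (A : List Nat) (hA : A ≠ []) (hcl : ∀ a ∈ A, ∀ b ∈ A, a ^^^ b ∈ A)
    (w : Nat) : pvRep A (pvRep A w) = pvRep A w := by
  obtain ⟨hm, _⟩ := pvRepSpec A hA w
  obtain ⟨s, hs, hrw⟩ := List.mem_map.mp hm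
  rw [← hrw, pvRepCoset A hA hcl w s hs]
  exact hrw.symm

-- the image of pvRep on range(2^m) has 2^(m-d) elements
theorem pvImageCard (m d : Nat) (A : List Nat) (hnd : A.Nodup) (h0 : 0 ∈ A)
    (hbd : ∀ a ∈ A, a < 2^m) (hcl : ∀ a ∈ A, ∀ b ∈ A, a ^^^ b ∈ A)
    (hlen : A.length = 2^d) :
    ((Finset.range (2^m)).image (pvRep A)).card = 2^(m-d) := by
  have hA : A ≠ [] := by intro h; rw [h] at h0; exact absurd h0 (List.not_mem_nil)
  have hdm : d ≤ m := by
    have h1 : A.toFinset.card = A.length := List.toFinset_card_of_nodup hnd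
    have h2 : A.toFinset ⊆ Finset.range (2^m) := by
      intro a ha
      rw [Finset.mem_range]
      exact hbd a (List.mem_toFinset.mp ha)
    have := Finset.card_le_card h2
    rw [Finset.card_range, h1, hlen] at this
    exact (Nat.pow_le_pow_iff_right (by norm_num)).mp this
  have hfiber : ∀ r ∈ (Finset.range (2^m)).image (pvRep A),
      {x ∈ Finset.range (2^m) | pvRep A x = r} = A.toFinset.image (fun s => r ^^^ s) := by
    intro r hr
    obtain ⟨w0, hw0, hw0r⟩ := Finset.mem_image.mp hr
    have hrfix : pvRep A r = r := by rw [← hw0r]; exact pvRepFixed A hA hcl w0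
    apply Finset.ext
    intro x
    simp only [Finset.mem_filter, Finset.mem_range, Finset.mem_image, List.mem_toFinset]
    constructor
    · rintro ⟨hxlt, hxr⟩
      obtain ⟨hm, _⟩ := pvRepSpec A hA x
      obtain ⟨s, hs, hrs⟩ := List.mem_map.mp hm
      refine ⟨s, hs, ?_⟩
      rw [← hxr, ← hrs, Nat.xor_assoc]
      simp
    · rintro ⟨s, hs, rfl⟩
      have hrlt : r < 2^m := by
        rw [← hw0r]
        obtain ⟨hm, _⟩ := pvRepSpec A hA w0
        obtain ⟨s', hs', hrs'⟩ := List.mem_map.mp hm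
        rw [← hrs']
        exact Nat.xor_lt_two_pow (Finset.mem_range.mp hw0) (hbd s' hs')
      refine ⟨Nat.xor_lt_two_pow hrlt (hbd s hs), ?_⟩
      rw [pvRepCoset A hA hcl r s hs, hrfix]
  have hcount := Finset.card_eq_sum_card_image (pvRep A) (Finset.range (2^m))
  rw [Finset.card_range] at hcount
  have hsum : ∑ r ∈ (Finset.range (2^m)).image (pvRep A),
      {x ∈ Finset.range (2^m) | pvRep A x = r}.card
      = ((Finset.range (2^m)).image (pvRep A)).card * 2^d := by
    rw [Finset.sum_congr rfl (fun r hr => by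
      rw [hfiber r hr, Finset.card_image_of_injective _ (fun a b h => by
        simpa using congrArg (fun t => r ^^^ t) h),
        List.toFinset_card_of_nodup hnd, hlen])]
    rw [Finset.sum_const, smul_eq_mul]
  rw [hsum] at hcount
  have hpow : 2^(m-d) * 2^d = 2^m := by
    rw [← pow_add]
    congr 1
    omega
  have h2d : 0 < 2^d := Nat.two_pow_pos d
  have : ((Finset.range (2^m)).image (pvRep A)).card * 2^d = 2^(m-d) * 2^d := by
    rw [← hcount, hpow]
  exact Nat.eq_of_mul_eq_mul_right h2d this

theorem pvOfListLen (R : List Int) :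
    (PySem.Set.ofList R).length = R.toFinset.card := by
  have hnd := PySem.Set.nodup_ofList (xs := R)
  rw [← List.toFinset_card_of_nodup hnd]
  congr 1
  apply Finset.ext
  intro x
  rw [List.mem_toFinset, List.mem_toFinset, PySem.Set.mem_ofList]

theorem pvCountFormula (m d : Nat) (A : List Nat) (hnd : A.Nodup) (h0 : 0 ∈ A)
    (hbd : ∀ a ∈ A, a < 2^m) (hcl : ∀ a ∈ A, ∀ b ∈ A, a ^^^ b ∈ A)
    (hlen : A.length = 2^d) :
    ((PySem.List.pyRange 0 ((1:Int) <<< m) 1).foldl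
      (fun cl W =>
        match PySem.List.min? ((A.map (Nat.cast : Nat → Int)).map (fun c => PySem.Int.bxor W c)) (fun x => x) with
        | some r => PySem.Set.add cl r
        | none => cl)
      PySem.Set.empty).length = 2^(m-d) := by
  have hA : A ≠ [] := by intro h; rw [h] at h0; exact absurd h0 (List.not_mem_nil)
  rw [pvOneShl, PySem.List.pyRange_zero_natCast, List.foldl_map]
  have hcongr : (List.range (2^m)).foldl
      (fun cl w =>
        match PySem.List.min? ((A.map (Nat.cast : Nat → Int)).map (fun c => PySem.Int.bxor ((w:Nat):Int) c)) (fun x => x) with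
        | some r => PySem.Set.add cl r
        | none => cl)
      PySem.Set.empty
      = (List.range (2^m)).foldl (fun cl w => PySem.Set.add cl ((pvRep A w : Nat) : Int)) PySem.Set.empty := by
    apply PySem.List.foldl_congr_mem
    intro acc w _
    rw [pvPortMin A hA w]
  rw [hcongr]
  have hfold : (List.range (2^m)).foldl (fun cl w => PySem.Set.add cl ((pvRep A w : Nat) : Int)) PySem.Set.empty
      = PySem.Set.ofList ((List.range (2^m)).map (fun w => ((pvRep A w : Nat) : Int))) := by
    rw [← PySem.Set.update_map_eq_foldl_add]
    exact PySem.Set.update_empty _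
  rw [hfold, pvOfListLen]
  have himg : ((List.range (2^m)).map (fun w => ((pvRep A w : Nat) : Int))).toFinset
      = ((Finset.range (2^m)).image (pvRep A)).image (Nat.cast : Nat → Int) := by
    apply Finset.ext
    intro x
    rw [List.mem_toFinset]
    constructor
    · intro hx
      obtain ⟨w, hw, rfl⟩ := List.mem_map.mp hx
      exact Finset.mem_image.mpr ⟨pvRep A w,
        Finset.mem_image.mpr ⟨w, Finset.mem_range.mpr (List.mem_range.mp hw), rfl⟩, rfl⟩
    · intro hx
      obtain ⟨y, hy, rfl⟩ := Finset.mem_image.mp hx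
      obtain ⟨w, hw, rfl⟩ := Finset.mem_image.mp hy
      exact List.mem_map.mpr ⟨w, List.mem_range.mpr (Finset.mem_range.mp hw), rfl⟩
  rw [himg, Finset.card_image_of_injective _ (fun a b h => by exact_mod_cast h)]
  exact pvImageCard m d A hnd h0 hbd hcl hlen

-- B's span equals A's span list, given the span characterisation
theorem pvBSpanEq (B : List (Int × Nat)) (A : List Nat) (hnd : A.Nodup)
    (hspan : pvSpan B = A.map (Nat.cast : Nat → Int))
    (hsx : (List.range (2^B.length)).map (fun k => bSubXor B k 0) = A.map (Nat.cast : Nat → Int)) :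
    bSpan B = pvSpan B := by
  unfold bSpan
  rw [pvOneShl, PySem.List.pyRange_zero_natCast, List.map_map]
  have hmap : (List.range (2^B.length)).map ((fun k => bSubXor B k.toNat 0) ∘ (Nat.cast : Nat → Int))
      = (List.range (2^B.length)).map (fun k => bSubXor B k 0) := by
    apply List.map_congr_left
    intro k _
    simp [Function.comp]
  rw [hmap, hsx, hspan]
  exact PySem.Set.ofList_eq_self_of_nodup _ (hnd.map (fun a a' h => by exact_mod_cast h))

-- ===== VERDICT (by name: the statement is the Claim_ definition above) =====
theorem count_switching_classes_spec : Claim_equal_count_switching_classes := by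
  intro n edges adj _hD _hP
  unfold Spec_count_switching_classes count_switching_classes count_switching_classes_alt
  obtain ⟨A, hspan, hnd, h0, hbd, hcl, hlen, hsx, _⟩ :=
    pvSpanSpec edges.length (pvBasis (pvIncid n edges))
      (pvBasisGood edges.length (pvIncid n edges) (pvIncidBdd n edges))
  have hb : bBasis (bIncid n edges) [] = pvBasis (pvIncid n edges) := by
    rw [pvBIncidEq, pvBBasisPv]
  have hlen' : PySem.List.len edges = (edges.length : Int) := by
    simp [PySem.List.len_eq]
  simp only [hb, Prod.mk.injEq, hlen', hspan]
  refine ⟨?_, ?_, trivial⟩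
  · rw [Int.toNat_natCast]
    have hcount := pvCountFormula edges.length (pvBasis (pvIncid n edges)).length A hnd h0 hbd hcl hlen
    unfold PySem.Set.len
    rw [hcount]
    have hsub : (((edges.length : Int)) - ((pvBasis (pvIncid n edges)).length : Int)).toNat
        = edges.length - (pvBasis (pvIncid n edges)).length := by omega
    rw [hsub, pvOneShl]
  · rw [← hspan]
    exact (pvBSpanEq _ A hnd hspan hsx).symm
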